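-- pv_equiv track=rewrite | github.com/mit-lean/DecTrain | src/train.py | ablation_study_setup
-- ===== SOURCE A (Python) =====
-- def ablation_study_setup(run_parameters, policy_feat):
--     if policy_feat is None:
--         return None
--     if "ablation_target" not in run_parameters:
--         return policy_feat
--     if run_parameters["ablation_target"] == None:
--         return policy_feat
--     if "epistemic_unc" in run_parameters["ablation_target"]:
--         policy_feat["epistemic_avg"] = 0
--         policy_feat["epistemic_var"] = 0
--         policy_feat["epistemic_mid"] = 0
--         policy_feat["epistemic_max"] = 0
--     if "aleatoric_unc" in run_parameters["ablation_target"]: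
--         for key in policy_feat.keys():
--             if "aleatoric" in key:
--                 policy_feat[key] = 0
--     if "depth" in run_parameters["ablation_target"]:
--         for key in policy_feat.keys():
--             if "depth" in key:
--                 policy_feat[key] = 0
--     if "loss" in run_parameters["ablation_target"]:
--         policy_feat["prev_loss_curr"] = 0
--     if "pose" in run_parameters["ablation_target"]:
--         for key in policy_feat.keys():
--             if "translation" in key or "rotation" in key:
--                 policy_feat[key] = 0
--     if "landmark" in run_parameters["ablation_target"]:
--         for key in policy_feat.keys():
--             if "landmark" in key:
--                 policy_feat[key] = 0
--     return policy_feat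
-- ===== SOURCE B (Python) =====
-- def ablation_study_setup(run_parameters, policy_feat):
--     if policy_feat is None:
--         return None
--     target = run_parameters.get("ablation_target")
--     if target is None:
--         return policy_feat
--     # table-driven: active substring rules and forced-to-zero keys are derived
--     # from the target string once, then the dict is rebuilt in one pure pass
--     rules = [("aleatoric_unc", ["aleatoric"]),
--              ("depth", ["depth"]),
--              ("pose", ["translation", "rotation"]),
--              ("landmark", ["landmark"])]
--     subs = [s for flag, ss in rules if flag in target for s in ss]
--     forced = (["epistemic_avg", "epistemic_var", "epistemic_mid", "epistemic_max"]
--               if "epistemic_unc" in target else []) \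
--              + (["prev_loss_curr"] if "loss" in target else [])
--     fset = set(forced)
--     out = {k: 0 if k in fset or any(s in k for s in subs) else v
--            for k, v in policy_feat.items()}
--     for k in forced:
--         out.setdefault(k, 0)
--     return out
-- ===== Notes on version B (the rewrite author's own statement) =====
-- stated objective: alternative
-- what changed: A mutates the dict in place through six flag-specific blocks (explicit key assignments plus up to four separate key scans); B is table-driven: it derives the active substring rules and the forced-to-zero keys from a rule table once, rebuilds the dict in a single pure comprehension, and appends missing forced keys with setdefault.
import Mathlib
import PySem

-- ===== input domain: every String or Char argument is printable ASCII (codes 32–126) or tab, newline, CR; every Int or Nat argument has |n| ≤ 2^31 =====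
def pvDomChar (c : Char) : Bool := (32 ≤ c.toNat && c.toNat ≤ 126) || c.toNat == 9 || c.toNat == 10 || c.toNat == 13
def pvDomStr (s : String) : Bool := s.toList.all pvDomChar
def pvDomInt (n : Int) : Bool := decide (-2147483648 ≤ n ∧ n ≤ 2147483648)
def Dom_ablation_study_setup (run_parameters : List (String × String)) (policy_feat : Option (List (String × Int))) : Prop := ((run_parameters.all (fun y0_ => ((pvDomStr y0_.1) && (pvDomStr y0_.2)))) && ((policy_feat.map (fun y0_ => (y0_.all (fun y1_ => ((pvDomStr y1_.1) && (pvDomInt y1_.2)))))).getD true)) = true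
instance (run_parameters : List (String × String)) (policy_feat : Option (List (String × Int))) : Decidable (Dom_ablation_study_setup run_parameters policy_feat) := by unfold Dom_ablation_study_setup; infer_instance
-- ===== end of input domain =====

-- ===== PORT A =====
-- B is table-driven: it derives the active substring rules and forced-to-zero keys from a rule
-- table and rebuilds the dict in one pure pass; A mutates the dict in place (B does not mutate —
-- the equivalence proved here is about the RETURN value).

-- ===== PORT A =====
-- A's `run_parameters["ablation_target"] == None` guard can never fire here (dict values are strings), so the port's none-branch of get? covers only the missing-key guard.
def ablation_study_setup (run_parameters : List (String × String)) (policy_feat : Option (List (String × Int))) : Option (List (String × Int)) :=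
  match policy_feat with
  | none => none
  | some items =>
    match (PySem.Dict.mk run_parameters).get? "ablation_target" with
    | none => some items
    | some target =>
      let d : PySem.Dict String Int := PySem.Dict.mk items
      let d := if PySem.Str.isIn "epistemic_unc" target then
          (((d.insert "epistemic_avg" 0).insert "epistemic_var" 0).insert "epistemic_mid" 0).insert "epistemic_max" 0
        else d
      let d := if PySem.Str.isIn "aleatoric_unc" target then
          d.keys.foldl (fun acc k => if PySem.Str.isIn "aleatoric" k then acc.insert k 0 else acc) d
        else d
      let d := if PySem.Str.isIn "depth" target then
          d.keys.foldl (fun acc k => if PySem.Str.isIn "depth" k then acc.insert k 0 else acc) d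
        else d
      let d := if PySem.Str.isIn "loss" target then d.insert "prev_loss_curr" 0 else d
      let d := if PySem.Str.isIn "pose" target then
          d.keys.foldl (fun acc k => if PySem.Str.isIn "translation" k || PySem.Str.isIn "rotation" k then acc.insert k 0 else acc) d
        else d
      let d := if PySem.Str.isIn "landmark" target then
          d.keys.foldl (fun acc k => if PySem.Str.isIn "landmark" k then acc.insert k 0 else acc) d
        else d
      some d.items

-- ===== PORT B =====
def ablation_study_setup_alt (run_parameters : List (String × String)) (policy_feat : Option (List (String × Int))) : Option (List (String × Int)) :=
  match policy_feat with
  | none => none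
  | some items =>
    match (PySem.Dict.mk run_parameters).get? "ablation_target" with
    | none => some items
    | some target =>
      let rules : List (String × List String) :=
        [("aleatoric_unc", ["aleatoric"]), ("depth", ["depth"]),
         ("pose", ["translation", "rotation"]), ("landmark", ["landmark"])]
      let subs := (rules.filter (fun r => PySem.Str.isIn r.1 target)).flatMap (fun r => r.2)
      let forced :=
        (if PySem.Str.isIn "epistemic_unc" target then
            ["epistemic_avg", "epistemic_var", "epistemic_mid", "epistemic_max"] else [])
        ++ (if PySem.Str.isIn "loss" target then ["prev_loss_curr"] else [])
      let fset := PySem.Set.ofList forced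
      let out := PySem.Dict.mk ((PySem.Dict.mk items).items.map (fun p =>
          (p.1, if fset.contains p.1 || subs.any (fun s => PySem.Str.isIn s p.1) then (0 : Int) else p.2)))
      let out := forced.foldl (fun acc k => acc.setdefault k 0) out
      some out.items

-- ===== PRECONDITION & SPEC =====
def Spec_ablation_study_setup (run_parameters : List (String × String)) (policy_feat : Option (List (String × Int))) (out : Option (List (String × Int))) : Prop := out = ablation_study_setup_alt run_parameters policy_feat
instance (run_parameters : List (String × String)) (policy_feat : Option (List (String × Int))) (out : Option (List (String × Int))) : Decidable (Spec_ablation_study_setup run_parameters policy_feat out) := by unfold Spec_ablation_study_setup; infer_instance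

-- ===== CLAIM (what is proved, stated in full; the proofs are below) =====
def Claim_equal_ablation_study_setup : Prop := ∀ (run_parameters : List (String × String)) (policy_feat : Option (List (String × Int))), Dom_ablation_study_setup run_parameters policy_feat → Spec_ablation_study_setup run_parameters policy_feat (ablation_study_setup run_parameters policy_feat)

-- ===== LEMMAS AND PROOFS =====

-- the pointwise effect of a zeroing pass on one item
def pvZ (c : String → Bool) (p : String × Int) : String × Int := if c p.1 then (p.1, 0) else p

lemma pvZ_comp (c₁ c₂ : String → Bool) (p : String × Int) :
    pvZ c₂ (pvZ c₁ p) = pvZ (fun k => c₁ k || c₂ k) p := by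
  by_cases h1 : c₁ p.1 <;> by_cases h2 : c₂ p.1 <;> simp [pvZ, h1, h2]

-- a zero-if-cond pass over keys ks rewrites every item whose key is in ks through pvZ (no key-uniqueness needed)
lemma pvZl_aux (c : String → Bool) (ks : List String) (d : PySem.Dict String Int)
    (h : ∀ k ∈ ks, d.contains k = true) :
    ks.foldl (fun acc k => if c k then acc.insert k 0 else acc) d
      = PySem.Dict.mk (d.items.map (fun p => if c p.1 && ks.contains p.1 then (p.1, 0) else p)) := by
  induction ks generalizing d with
  | nil =>
    simp only [List.foldl_nil]
    apply PySem.Dict.ext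
    simp
  | cons k ks ih =>
    simp only [List.foldl_cons]
    by_cases hc : c k
    · have hk : d.contains k = true := h k (by simp)
      rw [if_pos hc, ih _ (by intro j hj; simp [PySem.Dict.contains_insert, h j (List.mem_cons_of_mem _ hj)])]
      congr 1
      rw [PySem.Dict.items_insert_of_contains _ _ hk, List.map_map]
      apply List.map_congr_left
      intro p _
      by_cases hp : p.1 = k
      · simp [Function.comp, hp, hc]
      · simp [Function.comp, hp, (by simpa using hp : (p.1 == k) = false)]
    · rw [if_neg hc, ih _ (fun j hj => h j (List.mem_cons_of_mem _ hj))]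
      congr 1
      apply List.map_congr_left
      intro p _
      by_cases hp : p.1 = k
      · simp [hp, hc]
      · simp [hp]

lemma pvZl (c : String → Bool) (d : PySem.Dict String Int) :
    d.keys.foldl (fun acc k => if c k then acc.insert k 0 else acc) d
      = PySem.Dict.mk (d.items.map (pvZ c)) := by
  rw [pvZl_aux c d.keys d (by intro k hk; simpa [PySem.Dict.contains_iff_mem_keys] using hk)]
  congr 1
  apply List.map_congr_left
  intro p hp
  have hm : p.1 ∈ d.keys := by
    simp only [PySem.Dict.keys, List.mem_map]
    exact ⟨p, hp, rfl⟩
  simp [pvZ, hm]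

-- a flag-guarded pass is a pass whose condition carries the flag
lemma pvZl_flag (b : Bool) (c : String → Bool) (d : PySem.Dict String Int) :
    (if b then d.keys.foldl (fun acc k => if c k then acc.insert k 0 else acc) d else d)
      = PySem.Dict.mk (d.items.map (pvZ (fun k => b && c k))) := by
  cases b with
  | false =>
    simp only [Bool.false_and]
    apply PySem.Dict.ext
    show d.items = d.items.map (pvZ fun _ => false)
    rw [show (pvZ fun _ : String => false) = id from funext fun p => by simp [pvZ], List.map_id]
  | true =>
    simp only [Bool.true_and, if_true]
    exact pvZl c d

-- inserting (k, 0) commutes with a zeroing map over the items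
lemma pvIns_comm (c : String → Bool) (d : PySem.Dict String Int) (k : String) :
    (PySem.Dict.mk (d.items.map (pvZ c))).insert k 0
      = PySem.Dict.mk ((d.insert k 0).items.map (pvZ c)) := by
  have hfst : (d.items.map (pvZ c)).map (fun x => x.1) = d.items.map (fun x => x.1) := by
    rw [List.map_map]
    apply List.map_congr_left
    intro p _
    by_cases hp : c p.1 <;> simp [Function.comp, pvZ, hp]
  have hcont : (PySem.Dict.mk (d.items.map (pvZ c))).contains k = d.contains k := by
    simp only [PySem.Dict.contains_eq_decide_mem_keys, PySem.Dict.keys]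
    simp only [hfst]
    rfl
  apply PySem.Dict.ext
  by_cases hk : d.contains k = true
  · rw [PySem.Dict.items_insert_of_contains _ _ (hcont.trans hk),
        PySem.Dict.items_insert_of_contains _ _ hk]
    show (d.items.map (pvZ c)).map _ = (d.items.map _).map (pvZ c)
    rw [List.map_map, List.map_map]
    apply List.map_congr_left
    intro p _
    by_cases hp : p.1 = k
    · subst hp
      by_cases hc : c p.1 <;> simp [Function.comp, pvZ, hc]
    · have hb : (p.1 == k) = false := by simpa using hp
      by_cases hc : c p.1 <;> simp [Function.comp, pvZ, hb, hc]
  · have hk' : d.contains k = false := by simpa using hk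
    rw [PySem.Dict.items_insert_of_not_contains _ _ (hcont.trans hk'),
        PySem.Dict.items_insert_of_not_contains _ _ hk']
    show (d.items.map (pvZ c)) ++ _ = (d.items ++ [(k, 0)]).map (pvZ c)
    simp [pvZ]

-- the four A passes (with the loss insert between them) equal one combined pass after the loss insert
lemma pvChain (a dp lo po lm : Bool) (d0 : PySem.Dict String Int) :
    (let d1 := if a then d0.keys.foldl (fun acc k => if PySem.Str.isIn "aleatoric" k then acc.insert k 0 else acc) d0 else d0
     let d2 := if dp then d1.keys.foldl (fun acc k => if PySem.Str.isIn "depth" k then acc.insert k 0 else acc) d1 else d1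
     let d3 := if lo then d2.insert "prev_loss_curr" 0 else d2
     let d4 := if po then d3.keys.foldl (fun acc k => if PySem.Str.isIn "translation" k || PySem.Str.isIn "rotation" k then acc.insert k 0 else acc) d3 else d3
     let d5 := if lm then d4.keys.foldl (fun acc k => if PySem.Str.isIn "landmark" k then acc.insert k 0 else acc) d4 else d4
     d5)
    = (let d1 := if lo then d0.insert "prev_loss_curr" 0 else d0
       d1.keys.foldl (fun acc k =>
          if (a && PySem.Str.isIn "aleatoric" k) || (dp && PySem.Str.isIn "depth" k)
             || (po && (PySem.Str.isIn "translation" k || PySem.Str.isIn "rotation" k))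
             || (lm && PySem.Str.isIn "landmark" k) then acc.insert k 0 else acc) d1) := by
  simp only [pvZl_flag a, pvZl_flag dp]
  have hmerge : ∀ (l : List (String × Int)) (c₁ c₂ : String → Bool),
      (PySem.Dict.mk (l.map (pvZ c₁))).items.map (pvZ c₂) = l.map (pvZ (fun k => c₁ k || c₂ k)) := by
    intro l c₁ c₂
    show (l.map (pvZ c₁)).map (pvZ c₂) = _
    rw [List.map_map]
    apply List.map_congr_left
    intro p _
    exact pvZ_comp c₁ c₂ p
  cases lo with
  | false =>
    simp only [Bool.false_eq_true, if_false, pvZl_flag po, pvZl_flag lm, hmerge]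
    rw [pvZl]
  | true =>
    simp only [if_true, hmerge]
    rw [pvIns_comm, pvZl_flag po, pvZl_flag lm, hmerge, hmerge, pvZl]
    congr 1
    apply List.map_congr_left
    intro p _
    simp only [pvZ, Bool.or_assoc]

-- membership in a PySem.Set built from a list agrees with list containment
lemma pvSetContains (l : List String) (k : String) :
    (PySem.Set.ofList l).contains k = l.contains k := by
  by_cases h : k ∈ l
  · simp [h, (PySem.Set.mem_ofList l k).mpr h]
  · have h2 : k ∉ PySem.Set.ofList l := fun hc => h ((PySem.Set.mem_ofList l k).mp hc)
    simp [h, h2]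

-- B's table-derived substring test equals A's literal four-flag condition
lemma pvCond_eq (target k : String) :
    ((([("aleatoric_unc", ["aleatoric"]), ("depth", ["depth"]),
        ("pose", ["translation", "rotation"]), ("landmark", ["landmark"])] : List (String × List String)).filter
        (fun r => PySem.Str.isIn r.1 target)).flatMap (fun r => r.2)).any (fun s => PySem.Str.isIn s k)
      = ((PySem.Str.isIn "aleatoric_unc" target && PySem.Str.isIn "aleatoric" k)
         || (PySem.Str.isIn "depth" target && PySem.Str.isIn "depth" k)
         || (PySem.Str.isIn "pose" target && (PySem.Str.isIn "translation" k || PySem.Str.isIn "rotation" k))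
         || (PySem.Str.isIn "landmark" target && PySem.Str.isIn "landmark" k)) := by
  simp only [List.filter_cons, List.filter_nil]
  cases h1 : PySem.Str.isIn "aleatoric_unc" target <;>
    cases h2 : PySem.Str.isIn "depth" target <;>
      cases h3 : PySem.Str.isIn "pose" target <;>
        cases h4 : PySem.Str.isIn "landmark" target <;>
          simp [List.flatMap_cons, List.any_cons, Bool.or_assoc]

-- unconditional zero-inserts of ks followed by a zeroing pass equal a zeroing pass that also
-- covers ks followed by setdefault appends of ks
lemma pvCrux (ks : List String) (c : String → Bool) (d : PySem.Dict String Int) :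
    PySem.Dict.mk ((ks.foldl (fun acc k => acc.insert k 0) d).items.map (pvZ c))
      = ks.foldl (fun acc k => acc.setdefault k 0)
          (PySem.Dict.mk (d.items.map (pvZ (fun j => ks.contains j || c j)))) := by
  induction ks generalizing d with
  | nil =>
    simp only [List.foldl_nil]
    rfl
  | cons k ks ih =>
    simp only [List.foldl_cons]
    rw [ih]
    congr 1
    have hfst : ∀ c' : String → Bool,
        (d.items.map (pvZ c')).map (fun x => x.1) = d.items.map (fun x => x.1) := by
      intro c'
      rw [List.map_map]
      apply List.map_congr_left
      intro p _
      by_cases hp : c' p.1 <;> simp [Function.comp, pvZ, hp]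
    have hcont : (PySem.Dict.mk (d.items.map (pvZ (fun j => (k :: ks).contains j || c j)))).contains k
        = d.contains k := by
      simp only [PySem.Dict.contains_eq_decide_mem_keys, PySem.Dict.keys]
      simp only [hfst]
      rfl
    by_cases hk : d.contains k = true
    · rw [PySem.Dict.setdefault_of_contains _ 0 (hcont.trans hk)]
      apply PySem.Dict.ext
      rw [PySem.Dict.items_insert_of_contains _ _ hk]
      show (d.items.map _).map (pvZ _) = d.items.map (pvZ _)
      rw [List.map_map]
      apply List.map_congr_left
      intro p _
      by_cases hp : p.1 = k
      · have hb : (p.1 == k) = true := by simpa using hp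
        by_cases hc : ks.contains p.1 || c p.1 <;>
          simp [Function.comp, pvZ, hp]
      · have hb : (p.1 == k) = false := by simpa using hp
        simp [Function.comp, pvZ, hb, hp]
    · have hk' : d.contains k = false := by simpa using hk
      have hnomem : ∀ p ∈ d.items, p.1 ≠ k := by
        intro p hp hpk
        have : k ∈ d.items.map (fun x => x.1) := List.mem_map.mpr ⟨p, hp, hpk⟩
        have hmem : d.contains k = true := by
          simpa [PySem.Dict.contains_eq_decide_mem_keys, PySem.Dict.keys] using this
        rw [hk'] at hmem
        exact Bool.false_ne_true hmem
      rw [PySem.Dict.setdefault_of_not_contains _ 0 (hcont.trans hk')]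
      apply PySem.Dict.ext
      rw [PySem.Dict.items_insert_of_not_contains _ _ hk',
          PySem.Dict.items_insert_of_not_contains _ _ (hcont.trans hk')]
      show (d.items ++ [(k, 0)]).map (pvZ _) = d.items.map (pvZ _) ++ [(k, 0)]
      rw [List.map_append]
      congr 1
      · apply List.map_congr_left
        intro p hp
        simp [pvZ, hnomem p hp]
      · simp [pvZ]

-- the whole post-guard computation of A equals B's rebuild, for any target and starting dict
lemma pvMain (target : String) (d : PySem.Dict String Int) :
    (let d1 := if PySem.Str.isIn "epistemic_unc" target then
          (((d.insert "epistemic_avg" 0).insert "epistemic_var" 0).insert "epistemic_mid" 0).insert "epistemic_max" 0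
        else d
     let d2 := if PySem.Str.isIn "aleatoric_unc" target then
          d1.keys.foldl (fun acc k => if PySem.Str.isIn "aleatoric" k then acc.insert k 0 else acc) d1 else d1
     let d3 := if PySem.Str.isIn "depth" target then
          d2.keys.foldl (fun acc k => if PySem.Str.isIn "depth" k then acc.insert k 0 else acc) d2 else d2
     let d4 := if PySem.Str.isIn "loss" target then d3.insert "prev_loss_curr" 0 else d3
     let d5 := if PySem.Str.isIn "pose" target then
          d4.keys.foldl (fun acc k => if PySem.Str.isIn "translation" k || PySem.Str.isIn "rotation" k then acc.insert k 0 else acc) d4 else d4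
     let d6 := if PySem.Str.isIn "landmark" target then
          d5.keys.foldl (fun acc k => if PySem.Str.isIn "landmark" k then acc.insert k 0 else acc) d5 else d5
     d6)
    = (let rules : List (String × List String) :=
        [("aleatoric_unc", ["aleatoric"]), ("depth", ["depth"]),
         ("pose", ["translation", "rotation"]), ("landmark", ["landmark"])]
       let subs := (rules.filter (fun r => PySem.Str.isIn r.1 target)).flatMap (fun r => r.2)
       let forced :=
        (if PySem.Str.isIn "epistemic_unc" target then
            ["epistemic_avg", "epistemic_var", "epistemic_mid", "epistemic_max"] else [])
        ++ (if PySem.Str.isIn "loss" target then ["prev_loss_curr"] else [])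
       let fset := PySem.Set.ofList forced
       let out := PySem.Dict.mk (d.items.map (fun p =>
          (p.1, if fset.contains p.1 || subs.any (fun s => PySem.Str.isIn s p.1) then (0 : Int) else p.2)))
       forced.foldl (fun acc k => acc.setdefault k 0) out) := by
  refine (pvChain (PySem.Str.isIn "aleatoric_unc" target) (PySem.Str.isIn "depth" target)
      (PySem.Str.isIn "loss" target) (PySem.Str.isIn "pose" target)
      (PySem.Str.isIn "landmark" target) _).trans ?_
  rw [pvZl (fun k =>
      (PySem.Str.isIn "aleatoric_unc" target && PySem.Str.isIn "aleatoric" k)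
      || (PySem.Str.isIn "depth" target && PySem.Str.isIn "depth" k)
      || (PySem.Str.isIn "pose" target && (PySem.Str.isIn "translation" k || PySem.Str.isIn "rotation" k))
      || (PySem.Str.isIn "landmark" target && PySem.Str.isIn "landmark" k))]
  have hF : (if PySem.Str.isIn "loss" target then
        (if PySem.Str.isIn "epistemic_unc" target then
          (((d.insert "epistemic_avg" 0).insert "epistemic_var" 0).insert "epistemic_mid" 0).insert "epistemic_max" 0
        else d).insert "prev_loss_curr" 0
      else (if PySem.Str.isIn "epistemic_unc" target then
          (((d.insert "epistemic_avg" 0).insert "epistemic_var" 0).insert "epistemic_mid" 0).insert "epistemic_max" 0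
        else d))
      = ((if PySem.Str.isIn "epistemic_unc" target then
            ["epistemic_avg", "epistemic_var", "epistemic_mid", "epistemic_max"] else ([] : List String))
         ++ (if PySem.Str.isIn "loss" target then ["prev_loss_curr"] else [])).foldl
            (fun acc k => acc.insert k 0) d := by
    cases hep : PySem.Str.isIn "epistemic_unc" target <;>
      cases hlo : PySem.Str.isIn "loss" target <;>
        simp [List.foldl_cons, List.foldl_nil]
  rw [hF, pvCrux]
  have hM : PySem.Dict.mk (d.items.map (pvZ (fun j =>
        ((if PySem.Str.isIn "epistemic_unc" target then
            ["epistemic_avg", "epistemic_var", "epistemic_mid", "epistemic_max"] else ([] : List String))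
         ++ (if PySem.Str.isIn "loss" target then ["prev_loss_curr"] else [])).contains j
        || ((PySem.Str.isIn "aleatoric_unc" target && PySem.Str.isIn "aleatoric" j)
          || (PySem.Str.isIn "depth" target && PySem.Str.isIn "depth" j)
          || (PySem.Str.isIn "pose" target && (PySem.Str.isIn "translation" j || PySem.Str.isIn "rotation" j))
          || (PySem.Str.isIn "landmark" target && PySem.Str.isIn "landmark" j)))))
      = PySem.Dict.mk (d.items.map (fun p =>
          (p.1, if (PySem.Set.ofList ((if PySem.Str.isIn "epistemic_unc" target then
                ["epistemic_avg", "epistemic_var", "epistemic_mid", "epistemic_max"] else ([] : List String))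
             ++ (if PySem.Str.isIn "loss" target then ["prev_loss_curr"] else []))).contains p.1
             || ((([("aleatoric_unc", ["aleatoric"]), ("depth", ["depth"]),
                ("pose", ["translation", "rotation"]), ("landmark", ["landmark"])] : List (String × List String)).filter
                (fun r => PySem.Str.isIn r.1 target)).flatMap (fun r => r.2)).any (fun s => PySem.Str.isIn s p.1)
             then (0 : Int) else p.2))) := by
    apply PySem.Dict.ext
    show d.items.map _ = d.items.map _
    apply List.map_congr_left
    intro p _
    rw [pvSetContains, pvCond_eq]
    rcases p with ⟨k1, v1⟩
    simp only [pvZ]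
    split_ifs <;> rfl
  rw [hM]

-- ===== VERDICT (by name: the statement is the Claim_ definition above) =====
theorem ablation_study_setup_spec : Claim_equal_ablation_study_setup := by
  intro run_parameters policy_feat _
  unfold Spec_ablation_study_setup ablation_study_setup ablation_study_setup_alt
  cases policy_feat with
  | none => rfl
  | some items =>
    cases hget : (PySem.Dict.mk run_parameters).get? "ablation_target" with
    | none => rfl
    | some target =>
      exact congrArg (fun d => some (PySem.Dict.items d)) (pvMain target (PySem.Dict.mk items))
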